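-- pv_equiv track=rewrite | github.com/ning-cn-sy/Static-FJSP | MultiObjectiveOptimization/FJSP/Algorithm/Decode.py | get_machine_available_time
-- ===== SOURCE A (Python) =====
-- def get_machine_available_time(if_allow_forward, machine_finished_times, prev_time_job, processing_time):
--     """
--     计算机器的可用时间。
--
--     功能：
--     - 根据机器的使用时间片段，判断当前操作可以在哪个时间段开始。
--     - 如果是主动调度（`if_allow_forward=True`），通过查找机器空闲时间片实现操作的前移优化。
--     - 如果是半主动调度（`if_allow_forward=False`），则直接使用机器的最近结束时间作为可用时间。
--
--     调度逻辑：
--     1. 如果是主动调度：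
--         - 调用 `get_idle_times` 方法获取机器的空闲时间片段列表。
--         - 遍历空闲时间片段，找到一个满足操作开始条件的时间段。
--         - 检查空闲时间片段是否有足够的处理时间容纳当前操作：
--             - 计算空闲时间段的实际可用时间，并判断是否满足 `processing_time`。
--             - 如果满足，则返回操作的可用开始时间。
--         - 如果没有合适的时间片，则返回机器的最后结束时间。
--     2. 如果是半主动调度：
--         - 直接返回机器的最后结束时间，表示从此时间点开始操作。
--
--     Args:
--         if_allow_forward (bool): 是否为主动调度（True 表示主动调度，允许前移优化）。
--         machine_finished_times (list of tuple): 机器的使用时间片段列表，每个元素为 (start, end)，表示机器的占用时间段。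
--         prev_time_job (int): 当前工件前序操作的完成时间，当前操作不能早于此时间开始。
--         processing_time (int): 当前操作的处理时间。
--
--     Returns:
--         int: 当前操作可以开始的时间。
--     """
--     if if_allow_forward:
--         # 🎈 获取机器的空闲时间片段
--         idle_times = get_idle_times(machine_finished_times)
--         # 🎈 遍历所有空闲时间片段
--         for idle_time in idle_times:
--             # 🎈 计算当前时间片段的可用开始时间
--             # 操作必须满足前序操作的完成时间
--             available_start_time = max(idle_time[0], prev_time_job)
--             # 🎈 计算当前时间片段的剩余可用时间
--             available_time = idle_time[1] - available_start_time
--             # 🎈 如果当前空闲时间片段可以容纳操作，则返回操作的可用开始时间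
--             if available_time > processing_time:
--                 return available_start_time
--         # 🎈 如果没有合适的空闲时间片，返回机器的最后结束时间
--         return machine_finished_times[-1][1]
--     else:
--         # 🎈 半主动调度，直接返回机器的最后结束时间
--         return machine_finished_times[-1][1]
--
-- def get_idle_times(machine_finished_times):
--     """
--     获取机器的空闲时间段。
--
--     功能：
--     - 根据机器的已用时间片段，计算所有的空闲时间段。
--     - 假设输入的时间片段是有序的，并且表示机器的实际占用时间。
--
--     调度逻辑：
--     1. 初始化一个空列表 `idle_times`，用于存储空闲时间段。
--     2. 遍历机器的使用时间片段：
--         - 如果当前时间片段的开始时间大于前一个时间片段的结束时间，说明有空闲时间段。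
--         - 将空闲时间段 (prev_end, start) 添加到列表中。
--     3. 返回计算得到的空闲时间段列表。
--
--     Args:
--         machine_finished_times (list of tuple): 已用时间段列表，每个元素为 (start, end)，
--                                                 表示某段时间内机器被占用。
--                                                 假设输入的时间段是有序的。
--
--     Returns:
--         list of tuple: 空闲时间段列表，每个元素为 (start, end)，表示机器空闲的时间段。
--     """
--     # 初始化空闲时间段列表
--     idle_times = []
--
--     # 假设机器从时间 0 开始，记录上一个任务的结束时间
--     prev_end = 0
--
--     # 遍历已用时间段
--     for start, end in machine_finished_times:
--         # 🎈 如果当前任务的开始时间大于上一个任务的结束时间，说明有空闲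
--         if start > prev_end:
--             idle_times.append((prev_end, start))  # 添加空闲时间段
--         # 🎈 更新上一个任务的结束时间
--         prev_end = max(prev_end, end)
--
--     # 🎈 返回所有计算出的空闲时间段
--     return idle_times
-- ===== SOURCE B (Python) =====
-- def get_machine_available_time(if_allow_forward, machine_finished_times, prev_time_job, processing_time):
--     if if_allow_forward:
--         prev_end = 0
--         for start, end in machine_finished_times:
--             if start > prev_end:
--                 available_start = max(prev_end, prev_time_job)
--                 if start - available_start > processing_time:
--                     return available_start
--             prev_end = max(prev_end, end)
--     return machine_finished_times[-1][1]
-- ===== Notes on version B (the rewrite author's own statement) =====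
-- stated objective: simpler
-- what changed: Fuses the two phases (building the full idle-gap list with get_idle_times, then scanning it) into one single pass that tracks prev_end and returns the first fitting gap start directly, never materialising the gap list.
import Mathlib
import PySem

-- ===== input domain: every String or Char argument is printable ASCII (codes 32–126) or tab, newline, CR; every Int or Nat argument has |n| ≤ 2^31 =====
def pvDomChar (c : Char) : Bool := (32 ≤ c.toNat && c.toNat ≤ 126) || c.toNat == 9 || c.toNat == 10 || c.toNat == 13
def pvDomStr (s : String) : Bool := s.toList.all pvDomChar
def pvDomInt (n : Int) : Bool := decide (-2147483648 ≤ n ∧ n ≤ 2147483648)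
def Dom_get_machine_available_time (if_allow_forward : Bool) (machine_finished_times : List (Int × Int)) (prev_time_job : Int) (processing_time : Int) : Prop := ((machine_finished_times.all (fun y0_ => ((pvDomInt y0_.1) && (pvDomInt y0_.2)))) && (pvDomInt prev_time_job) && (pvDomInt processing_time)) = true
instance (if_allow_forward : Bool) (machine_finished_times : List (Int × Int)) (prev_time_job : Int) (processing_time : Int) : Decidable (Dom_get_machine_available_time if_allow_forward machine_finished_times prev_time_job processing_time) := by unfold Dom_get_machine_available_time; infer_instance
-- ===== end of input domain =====

-- B fuses A's two phases (build idle-gap list, then scan it) into one single pass; objective: simpler.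
-- ===== PORT A =====
-- helper: literal port of get_idle_times (fold carrying the idle list and prev_end)
def get_idle_times (machine_finished_times : List (Int × Int)) : List (Int × Int) :=
  (machine_finished_times.foldl
    (fun (st : List (Int × Int) × Int) p =>
      (if p.1 > st.2 then st.1 ++ [(st.2, p.1)] else st.1, max st.2 p.2))
    ([], 0)).1

-- the 'for idle_time in idle_times: … return' loop of A
def pvFindIdle (idle_times : List (Int × Int)) (prev_time_job processing_time : Int) : Option Int :=
  match idle_times with
  | [] => none
  | it :: rest =>
    let available_start_time := max it.1 prev_time_job
    let available_time := it.2 - available_start_time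
    if available_time > processing_time then some available_start_time
    else pvFindIdle rest prev_time_job processing_time

-- machine_finished_times[-1][1]; the `none` branch is unreachable under Pre_ (IndexError in Python)
def pvLastEndA (machine_finished_times : List (Int × Int)) : Int :=
  match PySem.List.pyGet? machine_finished_times (-1) with
  | some p => p.2
  | none => 0

def get_machine_available_time (if_allow_forward : Bool) (machine_finished_times : List (Int × Int)) (prev_time_job : Int) (processing_time : Int) : Int :=
  if if_allow_forward then
    let idle_times := get_idle_times machine_finished_times
    match pvFindIdle idle_times prev_time_job processing_time with
    | some v => v
    | none => pvLastEndA machine_finished_times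
  else pvLastEndA machine_finished_times

-- ===== PORT B =====
-- B's single-pass loop over machine_finished_times carrying prev_end
def pvScanGaps (machine_finished_times : List (Int × Int)) (prev_end prev_time_job processing_time : Int) : Option Int :=
  match machine_finished_times with
  | [] => none
  | (s, e) :: rest =>
    if s > prev_end then
      let available_start := max prev_end prev_time_job
      if s - available_start > processing_time then some available_start
      else pvScanGaps rest (max prev_end e) prev_time_job processing_time
    else pvScanGaps rest (max prev_end e) prev_time_job processing_time

def get_machine_available_time_alt (if_allow_forward : Bool) (machine_finished_times : List (Int × Int)) (prev_time_job : Int) (processing_time : Int) : Int :=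
  if if_allow_forward then
    match pvScanGaps machine_finished_times 0 prev_time_job processing_time with
    | some v => v
    | none =>
      -- machine_finished_times[-1][1]; `none` is unreachable under Pre_ (IndexError in Python)
      match PySem.List.pyGet? machine_finished_times (-1) with
      | some p => p.2
      | none => 0
  else
    match PySem.List.pyGet? machine_finished_times (-1) with
    | some p => p.2
    | none => 0

-- ===== PRECONDITION & SPEC =====
-- Pre_ excludes only the empty list, on which Python A (and B) raise IndexError at machine_finished_times[-1].
def Pre_get_machine_available_time (if_allow_forward : Bool) (machine_finished_times : List (Int × Int)) (prev_time_job : Int) (processing_time : Int) : Prop :=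
  machine_finished_times ≠ []
instance (if_allow_forward : Bool) (machine_finished_times : List (Int × Int)) (prev_time_job : Int) (processing_time : Int) : Decidable (Pre_get_machine_available_time if_allow_forward machine_finished_times prev_time_job processing_time) := by unfold Pre_get_machine_available_time; infer_instance

def pvWitness_get_machine_available_time : Bool × (List (Int × Int)) × Int × Int := (true, [(2, 5), (9, 12)], 1, 2)

def Spec_get_machine_available_time (if_allow_forward : Bool) (machine_finished_times : List (Int × Int)) (prev_time_job : Int) (processing_time : Int) (out : Int) : Prop := out = get_machine_available_time_alt if_allow_forward machine_finished_times prev_time_job processing_time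
instance (if_allow_forward : Bool) (machine_finished_times : List (Int × Int)) (prev_time_job : Int) (processing_time : Int) (out : Int) : Decidable (Spec_get_machine_available_time if_allow_forward machine_finished_times prev_time_job processing_time out) := by unfold Spec_get_machine_available_time; infer_instance

-- ===== CLAIM (what is proved, stated in full; the proofs are below) =====
def Claim_equal_get_machine_available_time : Prop := ∀ (if_allow_forward : Bool) (machine_finished_times : List (Int × Int)) (prev_time_job : Int) (processing_time : Int), Dom_get_machine_available_time if_allow_forward machine_finished_times prev_time_job processing_time → Pre_get_machine_available_time if_allow_forward machine_finished_times prev_time_job processing_time → Spec_get_machine_available_time if_allow_forward machine_finished_times prev_time_job processing_time (get_machine_available_time if_allow_forward machine_finished_times prev_time_job processing_time)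

-- ===== LEMMAS AND PROOFS =====

-- the fold of get_idle_times with accumulator acc prepends acc
theorem pvFold_acc (l : List (Int × Int)) (acc : List (Int × Int)) (p : Int) :
    (l.foldl (fun (st : List (Int × Int) × Int) q =>
      (if q.1 > st.2 then st.1 ++ [(st.2, q.1)] else st.1, max st.2 q.2)) (acc, p)).1
    = acc ++ (l.foldl (fun (st : List (Int × Int) × Int) q =>
      (if q.1 > st.2 then st.1 ++ [(st.2, q.1)] else st.1, max st.2 q.2)) ([], p)).1 := by
  induction l generalizing acc p with
  | nil => simp
  | cons hd tl ih =>
    simp only [List.foldl_cons]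
    by_cases h : hd.1 > p
    · simp only [if_pos h, List.nil_append]
      rw [ih (acc ++ [(p, hd.1)]) (max p hd.2), ih [(p, hd.1)] (max p hd.2)]
      simp
    · simp only [if_neg h]
      rw [ih acc]

theorem pvFindIdle_append (xs ys : List (Int × Int)) (ptj pt : Int) :
    pvFindIdle (xs ++ ys) ptj pt
    = (pvFindIdle xs ptj pt).orElse (fun _ => pvFindIdle ys ptj pt) := by
  induction xs with
  | nil => simp [pvFindIdle]
  | cons hd tl ih =>
    simp only [List.cons_append, pvFindIdle]
    split_ifs with h
    · rfl
    · exact ih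

-- the key fusion lemma: scanning the idle list built from prev_end p equals B's one-pass scan from p
theorem pvFusion (l : List (Int × Int)) (p ptj pt : Int) :
    pvFindIdle
      ((l.foldl (fun (st : List (Int × Int) × Int) q =>
        (if q.1 > st.2 then st.1 ++ [(st.2, q.1)] else st.1, max st.2 q.2)) ([], p)).1)
      ptj pt
    = pvScanGaps l p ptj pt := by
  induction l generalizing p with
  | nil => simp [pvFindIdle, pvScanGaps]
  | cons hd tl ih =>
    obtain ⟨s, e⟩ := hd
    simp only [List.foldl_cons, pvScanGaps]
    by_cases h : s > p
    · simp only [if_pos h]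
      rw [pvFold_acc, pvFindIdle_append, ← ih (max p e)]
      by_cases h2 : s - max p ptj > pt <;> simp [pvFindIdle, h2, Option.orElse]
    · simp only [if_neg h]
      exact ih (max p e)

-- ===== VERDICT (by name: the statement is the Claim_ definition above) =====
theorem get_machine_available_time_spec : Claim_equal_get_machine_available_time := by
  intro aff l ptj pt _ _
  unfold Spec_get_machine_available_time get_machine_available_time get_machine_available_time_alt
  cases aff with
  | false => rfl
  | true =>
    simp only [get_idle_times, if_true]
    rw [pvFusion]
    cases pvScanGaps l 0 ptj pt <;> simp [pvLastEndA]
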